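-- pv_equiv track=rewrite | github.com/TYLERSFOSTER/Discrete-Signal-Tonality | src/dissig/utils/primes.py | prime_powers
-- ===== SOURCE A (Python) =====
-- def prime_divisors(modulus : int) -> list[int]:
--     """
--     Return the list of distinct prime divisors of a positive integer modulus.
--
--     Parameters:
--         modulus (int): A positive integer.
--
--     Returns:
--         list[int]: A list of distinct prime numbers that divide modulus.
--                    The list is in ascending order.
--     """
--     assert isinstance(modulus, int)
--     assert modulus >= 1
--
--     factors = []
--     d = 2
--     while d * d <= modulus:
--         if modulus % d == 0:
--             factors.append(d)
--             while modulus % d == 0: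
--                 modulus //= d
--         d += 1
--     if modulus > 1:
--         factors.append(modulus)
--
--     return factors
--
-- def prime_powers(modulus : int) -> list:
--     """
--     Return the list of prime powers in the prime factorization of a positive integer modulus.
--
--     Each element in the result is a tuple (p, e), where p is a prime divisor of modulus,
--     and e is the highest exponent such that p**e divides modulus.
--
--     Parameters:
--         modulus (int): A positive integer (modulus >= 1).
--
--     Returns:
--         list[tuple[int, int]]: A list of (prime, exponent) pairs representing the
--         prime power decomposition of modulus, in ascending order of primes.
--     """
--     assert isinstance(modulus, int)
--     assert modulus >= 1
--
--     prime_divisor_list = prime_divisors(modulus)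
--
--     ramified_primes = []
--     for divisor in prime_divisor_list:
--         exponent = 0
--         while modulus%divisor**(exponent + 1) == 0:
--             exponent += 1
--
--         ramified_primes.append((divisor, exponent))
--
--     return ramified_primes
-- ===== SOURCE B (Python) =====
-- def prime_powers(modulus : int) -> list:
--     """Prime power factorization as one fused trial-division sweep over a running quotient."""
--     assert isinstance(modulus, int)
--     assert modulus >= 1
--
--     m = modulus
--     out = []
--     d = 2
--     while d * d <= m:
--         if m % d == 0:
--             e = 0
--             while m % d == 0:
--                 m //= d
--                 e += 1
--             out.append((d, e))
--         d += 1
--     if m > 1: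
--         out.append((m, 1))
--     return out
-- ===== Notes on version B (the rewrite author's own statement) =====
-- stated objective: simpler
-- what changed: Replaces A's two-phase scheme (collect distinct primes with prime_divisors, then recompute each exponent by trying growing powers of p against the original modulus) with a single trial-division sweep that maintains the running quotient and counts each prime's divisions as it strips it.
import Mathlib
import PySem

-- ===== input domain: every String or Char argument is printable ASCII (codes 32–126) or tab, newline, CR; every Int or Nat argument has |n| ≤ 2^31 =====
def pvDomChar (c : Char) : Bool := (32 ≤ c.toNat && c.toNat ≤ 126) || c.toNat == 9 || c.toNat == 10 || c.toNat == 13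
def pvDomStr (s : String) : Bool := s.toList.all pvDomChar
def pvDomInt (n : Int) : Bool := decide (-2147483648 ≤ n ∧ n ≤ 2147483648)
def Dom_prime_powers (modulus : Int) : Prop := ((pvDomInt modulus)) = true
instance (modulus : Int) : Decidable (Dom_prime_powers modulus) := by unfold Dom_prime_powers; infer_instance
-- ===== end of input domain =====

-- B fuses A's two passes (distinct primes, then exponents re-derived from the original
-- modulus) into one reducing trial-division sweep; equivalence is proved on modulus ≥ 1
-- (A raises AssertionError otherwise).

-- ===== PORT A =====
-- Inside Pre_ every Python value involved is a nonnegative int, so the loops are ported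
-- on Nat (Python's // and % coincide with Nat division there); the Int signature casts.
-- Each while loop is a structural recursion on a fuel argument that only makes it total;
-- the fuel passed at each call site provably exceeds the number of iterations.

-- inner 'while modulus % d == 0: modulus //= d' of prime_divisors
def pdStripN : Nat → Nat → Nat → Nat
  | 0, m, _ => m
  | fuel + 1, m, d => if 2 ≤ d ∧ 1 ≤ m ∧ m % d = 0 then pdStripN fuel (m / d) d else m

-- outer 'while d * d <= modulus' loop of prime_divisors, plus the trailing 'if modulus > 1'
def pdLoopN : Nat → Nat → Nat → List Nat → List Nat
  | 0, _, _, acc => acc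
  | fuel + 1, m, d, acc =>
    if d * d ≤ m ∧ 2 ≤ d ∧ 1 ≤ m then
      if m % d = 0 then pdLoopN fuel (pdStripN m m d) (d + 1) (acc ++ [d])
      else pdLoopN fuel m (d + 1) acc
    else if 1 < m then acc ++ [m] else acc

-- 'exponent = 0; while modulus % divisor**(exponent+1) == 0: exponent += 1'
def expLoopN : Nat → Nat → Nat → Nat → Nat
  | 0, _, _, e => e
  | fuel + 1, n, d, e => if 2 ≤ d ∧ 1 ≤ n ∧ n % d ^ (e + 1) = 0 then expLoopN fuel n d (e + 1) else e

def prime_powers (modulus : Int) : List (Int × Int) :=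
  let n := modulus.toNat
  let prime_divisor_list := pdLoopN (n + 2) n 2 []
  prime_divisor_list.foldl
    (fun (acc : List (Int × Int)) (divisor : Nat) =>
      acc ++ [((divisor : Int), (expLoopN n n divisor 0 : Int))]) []

-- ===== PORT B =====
-- 'e = 0; while m % d == 0: m //= d; e += 1' returning the reduced m and the count
def stripCountN : Nat → Nat → Nat → Nat × Nat
  | 0, m, _ => (m, 0)
  | fuel + 1, m, d =>
    if 2 ≤ d ∧ 1 ≤ m ∧ m % d = 0 then
      ((stripCountN fuel (m / d) d).1, (stripCountN fuel (m / d) d).2 + 1)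
    else (m, 0)

-- B's single 'while d * d <= m' sweep appending (d, e) pairs, plus trailing '(m, 1)'
def ppLoopN : Nat → Nat → Nat → List (Nat × Nat) → List (Nat × Nat)
  | 0, _, _, out => out
  | fuel + 1, m, d, out =>
    if d * d ≤ m ∧ 2 ≤ d ∧ 1 ≤ m then
      if m % d = 0 then
        ppLoopN fuel (stripCountN m m d).1 (d + 1) (out ++ [(d, (stripCountN m m d).2)])
      else ppLoopN fuel m (d + 1) out
    else if 1 < m then out ++ [(m, 1)] else out

def prime_powers_alt (modulus : Int) : List (Int × Int) :=
  (ppLoopN (modulus.toNat + 2) modulus.toNat 2 []).map (fun pe => ((pe.1 : Int), (pe.2 : Int)))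

-- ===== PRECONDITION & SPEC =====
-- Pre_ excludes exactly modulus < 1, where A's 'assert modulus >= 1' raises AssertionError.
def Pre_prime_powers (modulus : Int) : Prop := 1 ≤ modulus
instance (modulus : Int) : Decidable (Pre_prime_powers modulus) := by
  unfold Pre_prime_powers; infer_instance
def pvWitness_prime_powers : Int := (12)

def Spec_prime_powers (modulus : Int) (out : List (Int × Int)) : Prop := out = prime_powers_alt modulus
instance (modulus : Int) (out : List (Int × Int)) : Decidable (Spec_prime_powers modulus out) := by unfold Spec_prime_powers; infer_instance

-- ===== CLAIM (what is proved, stated in full; the proofs are below) =====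
def Claim_equal_prime_powers : Prop := ∀ (modulus : Int), Dom_prime_powers modulus → Pre_prime_powers modulus → Spec_prime_powers modulus (prime_powers modulus)

-- ===== LEMMAS AND PROOFS =====

theorem stripCountN_fst : ∀ fuel m d, (stripCountN fuel m d).1 = pdStripN fuel m d := by
  intro fuel
  induction fuel with
  | zero => intro m d; rfl
  | succ fuel ih =>
    intro m d
    simp only [stripCountN, pdStripN]
    split
    · exact ih (m / d) d
    · rfl

-- with enough fuel, stripCountN splits off exactly the full d-power of m
theorem stripCountN_spec : ∀ fuel m d, m ≤ fuel → 2 ≤ d → 1 ≤ m →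
    m = d ^ (stripCountN fuel m d).2 * (stripCountN fuel m d).1 ∧
      ¬ d ∣ (stripCountN fuel m d).1 ∧ 1 ≤ (stripCountN fuel m d).1 := by
  intro fuel
  induction fuel with
  | zero => intro m d hf hd hm; omega
  | succ fuel ih =>
    intro m d hf hd hm
    simp only [stripCountN]
    split
    · rename_i h
      have hdvd : d ∣ m := Nat.dvd_of_mod_eq_zero h.2.2
      have hlt : m / d < m := Nat.div_lt_self (by omega) (by omega)
      have hq : 1 ≤ m / d := Nat.one_le_div_iff (by omega) |>.2 (Nat.le_of_dvd (by omega) hdvd)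
      obtain ⟨h1, h2, h3⟩ := ih (m / d) d (by omega) hd hq
      refine ⟨?_, h2, h3⟩
      calc m = d * (m / d) := (Nat.mul_div_cancel' hdvd).symm
      _ = d * (d ^ (stripCountN fuel (m / d) d).2 * (stripCountN fuel (m / d) d).1) := by
            rw [← h1]
      _ = d ^ ((stripCountN fuel (m / d) d).2 + 1) * (stripCountN fuel (m / d) d).1 := by ring
    · rename_i h
      refine ⟨by simp, fun hdvd => ?_, hm⟩
      exact h ⟨hd, hm, Nat.mod_eq_zero_of_dvd hdvd⟩

-- with enough fuel, the exponent loop lands on the exact multiplicity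
theorem expLoopN_spec : ∀ fuel n d e, 2 ≤ d → 1 ≤ n → d ^ e ∣ n → n + 1 ≤ fuel + d ^ (e + 1) →
    d ^ (expLoopN fuel n d e) ∣ n ∧ ¬ d ^ (expLoopN fuel n d e + 1) ∣ n := by
  intro fuel
  induction fuel with
  | zero =>
    intro n d e hd hn he hf
    simp only [expLoopN]
    refine ⟨he, fun hdvd => ?_⟩
    have := Nat.le_of_dvd (by omega) hdvd
    omega
  | succ fuel ih =>
    intro n d e hd hn he hf
    simp only [expLoopN]
    split
    · rename_i h
      apply ih n d (e + 1) hd hn (Nat.dvd_of_mod_eq_zero h.2.2)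
      have h1 : 1 ≤ d ^ (e + 1) := Nat.one_le_pow _ _ (by omega)
      have h2 : d ^ (e + 1) * 2 ≤ d ^ (e + 1) * d := Nat.mul_le_mul_left _ (by omega)
      have h3 : d ^ (e + 1 + 1) = d ^ (e + 1) * d := by ring
      omega
    · rename_i h
      refine ⟨he, fun hdvd => ?_⟩
      exact h ⟨hd, hn, Nat.mod_eq_zero_of_dvd hdvd⟩

theorem exp_unique (n d a b : Nat)
    (ha : d ^ a ∣ n) (ha' : ¬ d ^ (a + 1) ∣ n)
    (hb : d ^ b ∣ n) (hb' : ¬ d ^ (b + 1) ∣ n) : a = b := by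
  rcases lt_trichotomy a b with h | h | h
  · exact absurd (dvd_trans (pow_dvd_pow d (by omega : a + 1 ≤ b)) hb) ha'
  · exact h
  · exact (hb' (dvd_trans (pow_dvd_pow d (by omega : b + 1 ≤ a)) ha)).elim

theorem prime_of_no_small_div (p : Nat) (hp : 2 ≤ p)
    (h : ∀ q, 2 ≤ q → q < p → ¬ q ∣ p) : Nat.Prime p := by
  rw [Nat.prime_def_lt]
  refine ⟨hp, fun m hm hdvd => ?_⟩
  rcases Nat.lt_or_ge m 2 with hm2 | hm2
  · interval_cases m
    · exact absurd (Nat.eq_zero_of_zero_dvd hdvd) (by omega)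
    · rfl
  · exact absurd hdvd (h m hm2 hm)

-- the bisimulation of A's factor loop (plus A's later exponent recomputation on n₀)
-- against B's fused sweep: both loops consume the same fuel in lockstep
theorem main_loop (n₀ : Nat) (hn₀ : 1 ≤ n₀) :
    ∀ fuel m d accA accB, 2 ≤ d → 1 ≤ m →
      (∀ q, 2 ≤ q → q < d → ¬ q ∣ m) →
      (∀ p, Nat.Prime p → d ≤ p → ∀ k, p ^ k ∣ m ↔ p ^ k ∣ n₀) →
      accB = accA.map (fun p => (p, expLoopN n₀ n₀ p 0)) →
      ppLoopN fuel m d accB = (pdLoopN fuel m d accA).map (fun p => (p, expLoopN n₀ n₀ p 0)) := by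
  intro fuel
  induction fuel with
  | zero =>
    intro m d accA accB _ _ _ _ hacc
    simpa [ppLoopN, pdLoopN] using hacc
  | succ fuel ih =>
    intro m d accA accB hd hm hsmall hinv hacc
    simp only [ppLoopN, pdLoopN]
    by_cases h : d * d ≤ m ∧ 2 ≤ d ∧ 1 ≤ m
    · rw [if_pos h, if_pos h]
      by_cases hmod : m % d = 0
      · rw [if_pos hmod, if_pos hmod]
        -- d divides m: d is prime, strip it
        have hdprime : Nat.Prime d :=
          prime_of_no_small_div d hd (fun q hq1 hq2 hqd =>
            hsmall q hq1 hq2 (dvd_trans hqd (Nat.dvd_of_mod_eq_zero hmod)))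
        obtain ⟨hsplit, hnd, hpos⟩ := stripCountN_spec m m d le_rfl hd hm
        have hr1dvd : (stripCountN m m d).1 ∣ m :=
          ⟨d ^ (stripCountN m m d).2, hsplit.trans (mul_comm _ _)⟩
        -- multiplicity of d in m equals the strip count; transfer to n₀ via the invariant
        have hdm : d ^ (stripCountN m m d).2 ∣ m := ⟨_, hsplit⟩
        have hdm' : ¬ d ^ ((stripCountN m m d).2 + 1) ∣ m := by
          intro hdvd
          apply hnd
          obtain ⟨c, hc⟩ := hdvd
          have heq : d ^ (stripCountN m m d).2 * (stripCountN m m d).1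
              = d ^ (stripCountN m m d).2 * (d * c) := by
            calc d ^ (stripCountN m m d).2 * (stripCountN m m d).1 = m := hsplit.symm
            _ = d ^ ((stripCountN m m d).2 + 1) * c := hc
            _ = d ^ (stripCountN m m d).2 * (d * c) := by ring
          exact ⟨c, Nat.eq_of_mul_eq_mul_left (pow_pos (by omega : 0 < d) _) heq⟩
        have hdn : d ^ (stripCountN m m d).2 ∣ n₀ := (hinv d hdprime le_rfl _).1 hdm
        have hdn' : ¬ d ^ ((stripCountN m m d).2 + 1) ∣ n₀ :=
          fun hdvd => hdm' ((hinv d hdprime le_rfl _).2 hdvd)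
        have hexp : expLoopN n₀ n₀ d 0 = (stripCountN m m d).2 := by
          obtain ⟨h1, h2⟩ := expLoopN_spec n₀ n₀ d 0 hd hn₀ (by simp) (by
            have : 2 ≤ d ^ (0 + 1) := by simpa using hd
            omega)
          exact exp_unique n₀ d _ _ h1 h2 hdn hdn'
        -- establish the invariants for ((stripCountN m m d).1, d + 1)
        have hsmall' : ∀ q, 2 ≤ q → q < d + 1 → ¬ q ∣ (stripCountN m m d).1 := by
          intro q hq1 hq2 hqdvd
          rcases Nat.lt_or_ge q d with hlt | hge
          · exact hsmall q hq1 hlt (dvd_trans hqdvd hr1dvd)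
          · have : q = d := by omega
            exact hnd (this ▸ hqdvd)
        have hinv' : ∀ p, Nat.Prime p → d + 1 ≤ p →
            ∀ k, p ^ k ∣ (stripCountN m m d).1 ↔ p ^ k ∣ n₀ := by
          intro p hp hdp k
          have hcop : Nat.Coprime (p ^ k) (d ^ (stripCountN m m d).2) :=
            Nat.Coprime.pow k _ ((Nat.coprime_primes hp hdprime).mpr (by omega))
          constructor
          · intro hdvd
            exact (hinv p hp (by omega) k).1 (dvd_trans hdvd hr1dvd)
          · intro hdvd
            have hmul : p ^ k ∣ d ^ (stripCountN m m d).2 * (stripCountN m m d).1 :=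
              hsplit ▸ (hinv p hp (by omega) k).2 hdvd
            exact Nat.Coprime.dvd_of_dvd_mul_left hcop hmul
        rw [stripCountN_fst]
        have hfst : (stripCountN m m d).1 = pdStripN m m d := stripCountN_fst m m d
        exact ih (pdStripN m m d) (d + 1) (accA ++ [d]) (accB ++ [(d, (stripCountN m m d).2)])
          (by omega) (hfst ▸ hpos) (hfst ▸ hsmall') (hfst ▸ hinv') (by rw [hacc]; simp [hexp])
      · rw [if_neg hmod, if_neg hmod]
        exact ih m (d + 1) accA accB (by omega) hm
          (fun q hq1 hq2 hqdvd => by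
            rcases Nat.lt_or_ge q d with hlt | hge
            · exact hsmall q hq1 hlt hqdvd
            · have : q = d := by omega
              exact hmod (Nat.mod_eq_zero_of_dvd (this ▸ hqdvd)))
          (fun p hp hdp k => hinv p hp (by omega) k) hacc
    · rw [if_neg h, if_neg h]
      have hdd : ¬ d * d ≤ m := fun hdd => h ⟨hdd, hd, hm⟩
      by_cases h1 : 1 < m
      · rw [if_pos h1, if_pos h1]
        -- m itself is prime here
        have hmd : d ≤ m := by
          by_contra hlt
          exact hsmall m (by omega) (by omega) dvd_rfl
        have hmprime : Nat.Prime m := by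
          apply prime_of_no_small_div m (by omega)
          intro q hq1 hq2 hqdvd
          rcases Nat.lt_or_ge q d with hlt | hge
          · exact hsmall q hq1 hlt hqdvd
          · -- q ≥ d: the cofactor of q in m is a divisor in [2, d)
            obtain ⟨c, hc⟩ := hqdvd
            have hc2 : 2 ≤ c := by
              rcases Nat.lt_or_ge c 2 with hc2 | hc2
              · interval_cases c <;> omega
              · exact hc2
            have hcd : c < d := by
              rcases Nat.lt_or_ge c d with hcd | hcd
              · exact hcd
              · have : d * d ≤ q * c := Nat.mul_le_mul hge hcd
                omega
            exact hsmall c hc2 hcd ⟨q, by rw [hc]; ring⟩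
        have hm1 : m ^ 1 ∣ n₀ := (hinv m hmprime hmd 1).1 (by simp)
        have hm2 : ¬ m ^ 2 ∣ n₀ := by
          intro hdvd
          have hdm : m ^ 2 ∣ m := (hinv m hmprime hmd 2).2 hdvd
          have hle : m ^ 2 ≤ m := Nat.le_of_dvd (by omega) hdm
          nlinarith
        have hexp : expLoopN n₀ n₀ m 0 = 1 := by
          obtain ⟨g1, g2⟩ := expLoopN_spec n₀ n₀ m 0 (by omega) hn₀ (by simp) (by
            have : 2 ≤ m ^ (0 + 1) := by simpa using h1
            omega)
          exact exp_unique n₀ m _ 1 g1 g2 hm1 hm2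
        simp [hacc, hexp]
      · rw [if_neg h1, if_neg h1]
        exact hacc

theorem foldl_append_map (g : Nat → Int × Int) :
    ∀ (l : List Nat) (acc : List (Int × Int)),
      l.foldl (fun a x => a ++ [g x]) acc = acc ++ l.map g := by
  intro l
  induction l with
  | nil => simp
  | cons x xs ih => intro acc; simp [List.foldl, ih]

-- ===== VERDICT (by name: the statement is the Claim_ definition above) =====
theorem prime_powers_spec : Claim_equal_prime_powers := by
  intro modulus _ hpre
  unfold Spec_prime_powers prime_powers prime_powers_alt
  have hn : 1 ≤ modulus.toNat := by unfold Pre_prime_powers at hpre; omega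
  have hmain := main_loop modulus.toNat hn (modulus.toNat + 2) modulus.toNat 2 [] [] (by omega) hn
    (fun q hq1 hq2 _ => by omega)
    (fun p _ _ k => Iff.rfl) (by simp)
  rw [hmain]
  rw [foldl_append_map
    (fun divisor => ((divisor : Int), (expLoopN modulus.toNat modulus.toNat divisor 0 : Int)))]
  simp [List.map_map, Function.comp]
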